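-- pv_equiv track=rewrite | github.com/csinva/iai-clinical-decision-rule | src/data.py | select_final_feats
-- ===== SOURCE A (Python) =====
-- meta = ['iai_intervention', 'cv_fold', 'dset']
--
-- def remove_from_list(l, removes):
--     '''deletes all elements in removes from the list l and returns
--     '''
--     return [x for x in l
--             if not x in removes]
--
-- def select_final_feats(feat_names,
--                        collapse_abd_tender=True,
--                        collapse_abd_distention=True,
--                        collapse_age=True):
--     '''Return an interpretable set of the best features
--     '''
--     feat_names = [f for f in feat_names
--                   if not f in meta
--                   and not f.endswith('_no')
--                   and not 'Race' in f
--                   and not 'other' in f.lower()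
--                   and not 'unknown' in f.lower()
--                   ]
--     feat_names = remove_from_list(feat_names, ['LtCostalTender', 'RtCostalTender'])
--     feat_names = remove_from_list(feat_names, ['AbdTrauma_yes', 'SeatBeltSign_yes'])
--     feat_names = remove_from_list(feat_names, ['GCSScore'])
--     feat_names = remove_from_list(feat_names, ['InitHeartRate', 'InitSysBPRange']) # remove these so we can only have binary vars
--
--
--     # make abd tender into a None or not-None variable
--     if collapse_abd_tender:
--         feat_names = remove_from_list(feat_names, ['AbdTenderDegree_Mild', 'AbdTenderDegree_Moderate', 'AbdTenderDegree_Severe'])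
--
--     # whether to combine AbdomenPain and AbdDistention
--     if collapse_abd_distention:
--         feat_names = remove_from_list(feat_names, ['AbdomenPain_yes', 'AbdDistention_yes'])
--     else:
--         feat_names = remove_from_list(feat_names, ['AbdDistention_or_AbdomenPain_yes'])
--
--     if collapse_age:
--         feat_names = remove_from_list(feat_names, ['Age'])
--     else:
--         feat_names = remove_from_list(feat_names, ['Age<2_yes'])
--
--
--
--     return sorted(feat_names)
-- ===== SOURCE B (Python) =====
-- meta = ['iai_intervention', 'cv_fold', 'dset']
--
-- def select_final_feats(feat_names,
--                        collapse_abd_tender=True,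
--                        collapse_abd_distention=True,
--                        collapse_age=True):
--     '''Return an interpretable set of the best features
--     (single exclusion set + one filtering pass instead of repeated list scans)
--     '''
--     excluded = set(meta) | {'LtCostalTender', 'RtCostalTender',
--                             'AbdTrauma_yes', 'SeatBeltSign_yes',
--                             'GCSScore', 'InitHeartRate', 'InitSysBPRange'}
--     if collapse_abd_tender:
--         excluded |= {'AbdTenderDegree_Mild', 'AbdTenderDegree_Moderate', 'AbdTenderDegree_Severe'}
--     if collapse_abd_distention:
--         excluded |= {'AbdomenPain_yes', 'AbdDistention_yes'}
--     else:
--         excluded.add('AbdDistention_or_AbdomenPain_yes')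
--     if collapse_age:
--         excluded.add('Age')
--     else:
--         excluded.add('Age<2_yes')
--     kept = [f for f in feat_names
--             if f not in excluded
--             and not f.endswith('_no')
--             and 'Race' not in f
--             and 'other' not in f.lower()
--             and 'unknown' not in f.lower()]
--     return sorted(kept)
-- ===== Notes on version B (the rewrite author's own statement) =====
-- stated objective: simpler
-- what changed: Replaces the initial comprehension plus eight conditional remove_from_list passes over the feature list with building one exclusion set up front and a single filtering pass, then sorting.
import Mathlib
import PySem

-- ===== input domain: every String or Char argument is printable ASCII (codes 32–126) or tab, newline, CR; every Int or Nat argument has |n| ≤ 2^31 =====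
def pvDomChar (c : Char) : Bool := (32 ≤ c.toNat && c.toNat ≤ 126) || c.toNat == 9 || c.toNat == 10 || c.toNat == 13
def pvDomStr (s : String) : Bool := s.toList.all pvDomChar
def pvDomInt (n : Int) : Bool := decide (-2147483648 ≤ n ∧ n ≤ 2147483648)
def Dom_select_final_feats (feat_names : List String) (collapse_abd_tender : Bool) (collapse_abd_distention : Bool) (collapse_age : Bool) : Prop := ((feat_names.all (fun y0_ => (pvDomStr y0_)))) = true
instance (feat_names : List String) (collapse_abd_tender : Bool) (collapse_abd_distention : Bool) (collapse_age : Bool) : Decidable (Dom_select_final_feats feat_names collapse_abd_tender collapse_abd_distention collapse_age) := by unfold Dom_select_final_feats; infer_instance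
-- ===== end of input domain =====

-- B builds one exclusion set and keeps the survivors in a single pass; A makes repeated remove_from_list passes.

-- ===== PORT A =====
def pvMeta : List String := ["iai_intervention", "cv_fold", "dset"]

def remove_from_list (l : List String) (removes : List String) : List String :=
  l.filter (fun x => !(removes.contains x))

def select_final_feats (feat_names : List String) (collapse_abd_tender : Bool) (collapse_abd_distention : Bool) (collapse_age : Bool) : List String :=
  let f1 := feat_names.filter (fun f =>
    !(pvMeta.contains f)
    && !(PySem.Str.endswith f "_no")
    && !(PySem.Str.isIn "Race" f)
    && !(PySem.Str.isIn "other" (PySem.Str.lower f))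
    && !(PySem.Str.isIn "unknown" (PySem.Str.lower f)))
  let f2 := remove_from_list f1 ["LtCostalTender", "RtCostalTender"]
  let f3 := remove_from_list f2 ["AbdTrauma_yes", "SeatBeltSign_yes"]
  let f4 := remove_from_list f3 ["GCSScore"]
  let f5 := remove_from_list f4 ["InitHeartRate", "InitSysBPRange"]
  let f6 := if collapse_abd_tender then
      remove_from_list f5 ["AbdTenderDegree_Mild", "AbdTenderDegree_Moderate", "AbdTenderDegree_Severe"]
    else f5
  let f7 := if collapse_abd_distention then
      remove_from_list f6 ["AbdomenPain_yes", "AbdDistention_yes"]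
    else
      remove_from_list f6 ["AbdDistention_or_AbdomenPain_yes"]
  let f8 := if collapse_age then remove_from_list f7 ["Age"] else remove_from_list f7 ["Age<2_yes"]
  PySem.List.sorted f8 (fun x => x) false

-- ===== PORT B =====
def pvExcluded (collapse_abd_tender : Bool) (collapse_abd_distention : Bool) (collapse_age : Bool) : PySem.Set String :=
  let e0 := PySem.Set.union (PySem.Set.ofList pvMeta)
    (PySem.Set.ofList ["LtCostalTender", "RtCostalTender", "AbdTrauma_yes", "SeatBeltSign_yes",
                       "GCSScore", "InitHeartRate", "InitSysBPRange"])
  let e1 := if collapse_abd_tender then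
      PySem.Set.union e0 (PySem.Set.ofList ["AbdTenderDegree_Mild", "AbdTenderDegree_Moderate", "AbdTenderDegree_Severe"])
    else e0
  let e2 := if collapse_abd_distention then
      PySem.Set.union e1 (PySem.Set.ofList ["AbdomenPain_yes", "AbdDistention_yes"])
    else PySem.Set.add e1 "AbdDistention_or_AbdomenPain_yes"
  if collapse_age then PySem.Set.add e2 "Age" else PySem.Set.add e2 "Age<2_yes"

def select_final_feats_alt (feat_names : List String) (collapse_abd_tender : Bool) (collapse_abd_distention : Bool) (collapse_age : Bool) : List String :=
  let excluded := pvExcluded collapse_abd_tender collapse_abd_distention collapse_age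
  let kept := feat_names.filter (fun f =>
    !(PySem.Set.contains excluded f)
    && !(PySem.Str.endswith f "_no")
    && !(PySem.Str.isIn "Race" f)
    && !(PySem.Str.isIn "other" (PySem.Str.lower f))
    && !(PySem.Str.isIn "unknown" (PySem.Str.lower f)))
  PySem.List.sorted kept (fun x => x) false

-- ===== PRECONDITION & SPEC =====
def Spec_select_final_feats (feat_names : List String) (collapse_abd_tender : Bool) (collapse_abd_distention : Bool) (collapse_age : Bool) (out : List String) : Prop := out = select_final_feats_alt feat_names collapse_abd_tender collapse_abd_distention collapse_age
instance (feat_names : List String) (collapse_abd_tender : Bool) (collapse_abd_distention : Bool) (collapse_age : Bool) (out : List String) : Decidable (Spec_select_final_feats feat_names collapse_abd_tender collapse_abd_distention collapse_age out) := by unfold Spec_select_final_feats; infer_instance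

-- ===== CLAIM (what is proved, stated in full; the proofs are below) =====
def Claim_equal_select_final_feats : Prop := ∀ (feat_names : List String) (collapse_abd_tender : Bool) (collapse_abd_distention : Bool) (collapse_age : Bool), Dom_select_final_feats feat_names collapse_abd_tender collapse_abd_distention collapse_age → Spec_select_final_feats feat_names collapse_abd_tender collapse_abd_distention collapse_age (select_final_feats feat_names collapse_abd_tender collapse_abd_distention collapse_age)

-- ===== LEMMAS AND PROOFS =====

theorem select_final_feats_eq_alt (fn : List String) (t d a : Bool) :
    select_final_feats fn t d a = select_final_feats_alt fn t d a := by
  cases t <;> cases d <;> cases a <;>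
  · unfold select_final_feats select_final_feats_alt remove_from_list
    simp only [List.filter_filter, Bool.false_eq_true, if_false, if_true]
    congr 1
    refine List.filter_congr (fun f _ => ?_)
    rw [Bool.eq_iff_iff]
    simp [pvExcluded, pvMeta, PySem.Set.contains, PySem.Set.union, PySem.Set.add,
          PySem.Set.ofList, PySem.Set.update, List.contains_eq_mem]
    tauto

-- ===== VERDICT (by name: the statement is the Claim_ definition above) =====
theorem select_final_feats_spec : Claim_equal_select_final_feats := by
  intro fn t d a _
  unfold Spec_select_final_feats
  exact select_final_feats_eq_alt fn t d a
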